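-- pv_equiv track=rewrite | github.com/niolha/Introduction-to-Python | homework10.py | create_new_list1
-- ===== SOURCE A (Python) =====
-- def create_new_list1(my_list):
--     new_list = []
--     for index in range(len(my_list)):
--         if index % 2 != 0:
--             new_list.append(my_list[index][::-1])
--         else:
--             new_list.append(my_list[index])
--     return new_list
-- ===== SOURCE B (Python) =====
-- def create_new_list1(my_list):
--     new = list(my_list)
--     new[1::2] = [x[::-1] for x in new[1::2]]
--     return new
-- ===== Notes on version B (the rewrite author's own statement) =====
-- stated objective: idiomatic
-- what changed: Replaces the index loop with an index%2 branch by a shallow copy plus a strided slice assignment that reverses only the odd-index elements.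
import Mathlib
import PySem

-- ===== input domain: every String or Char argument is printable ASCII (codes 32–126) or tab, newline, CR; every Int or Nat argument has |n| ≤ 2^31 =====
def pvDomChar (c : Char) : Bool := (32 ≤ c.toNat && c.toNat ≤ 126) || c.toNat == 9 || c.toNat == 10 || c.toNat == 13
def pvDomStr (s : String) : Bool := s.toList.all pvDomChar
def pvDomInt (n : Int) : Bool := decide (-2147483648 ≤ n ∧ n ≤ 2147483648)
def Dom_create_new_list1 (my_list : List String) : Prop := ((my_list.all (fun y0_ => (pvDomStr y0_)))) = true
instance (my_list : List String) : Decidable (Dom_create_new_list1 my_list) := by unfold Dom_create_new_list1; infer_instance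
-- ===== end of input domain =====

-- B replaces A's index loop with an index%2 branch by a copy plus a strided odd-slice assignment (idiomatic; same cost).

-- ===== PORT A =====
-- loop 'for index in range(len(my_list))' with append; my_list[index] is always in range, so pyGetD is exact
def create_new_list1 (my_list : List String) : List String :=
  (PySem.List.pyRange 0 my_list.length 1).foldl
    (fun new_list index =>
      if PySem.Int.mod index 2 ≠ 0 then
        new_list ++ [(PySem.Str.slice? (PySem.List.pyGetD my_list index "") none none (-1)).getD ""]
      else
        new_list ++ [PySem.List.pyGetD my_list index ""])
    []

-- ===== PORT B =====
-- new[1::2] : the odd-index strided slice, ported by hand (exact: step-2 slice from index 1)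
def pvOdds : List String → List String
  | [] => []
  | [_] => []
  | _ :: b :: t => b :: pvOdds t

-- 'new[1::2] = vals' : slice assignment of equally many values into the odd positions, ported by hand
-- (exact when vals has the slice's length, which is the only way B calls it)
def pvSetOdds : List String → List String → List String
  | [], _ => []
  | [a], _ => [a]
  | a :: b :: t, [] => a :: b :: t
  | a :: _ :: t, v :: vs => a :: v :: pvSetOdds t vs

def create_new_list1_alt (my_list : List String) : List String :=
  pvSetOdds my_list
    ((pvOdds my_list).map (fun x => (PySem.Str.slice? x none none (-1)).getD ""))

-- ===== PRECONDITION & SPEC =====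
def Spec_create_new_list1 (my_list : List String) (out : List String) : Prop := out = create_new_list1_alt my_list
instance (my_list : List String) (out : List String) : Decidable (Spec_create_new_list1 my_list out) := by unfold Spec_create_new_list1; infer_instance

-- ===== CLAIM (what is proved, stated in full; the proofs are below) =====
def Claim_equal_create_new_list1 : Prop := ∀ (my_list : List String), Dom_create_new_list1 my_list → Spec_create_new_list1 my_list (create_new_list1 my_list)

-- ===== LEMMAS AND PROOFS =====

-- the common recursive shape: keep even positions, reverse odd ones, two at a time
def pvGo : List String → List String
  | [] => []
  | [a] => [a]
  | a :: b :: t => a :: (PySem.Str.slice? b none none (-1)).getD "" :: pvGo t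

theorem pvAlt_eq_go : ∀ (l : List String), create_new_list1_alt l = pvGo l := by
  intro l
  induction l using pvGo.induct with
  | case1 => simp [create_new_list1_alt, pvSetOdds, pvGo]
  | case2 a => simp [create_new_list1_alt, pvSetOdds, pvGo]
  | case3 a b t ih =>
      simpa [create_new_list1_alt, pvOdds, pvSetOdds, pvGo] using ih

-- A's loop, with the branch pushed inside the append
theorem pvFoldl_if_append (xs : List Int) (acc : List String)
    (c : Int → Bool) (f g : Int → String) :
    xs.foldl (fun a x => if c x then a ++ [f x] else a ++ [g x]) acc
      = acc ++ xs.map (fun x => if c x then f x else g x) := by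
  induction xs generalizing acc with
  | nil => simp
  | cons x xs ih => simp [List.foldl_cons, ih]; split <;> simp

theorem pvA_eq_map (l : List String) :
    create_new_list1 l
      = (List.range l.length).map
          (fun k => if k % 2 = 1 then (PySem.Str.slice? (l.getD k "") none none (-1)).getD "" else l.getD k "") := by
  unfold create_new_list1
  rw [show (fun (new_list : List String) (index : Int) =>
        if PySem.Int.mod index 2 ≠ 0 then
          new_list ++ [(PySem.Str.slice? (PySem.List.pyGetD l index "") none none (-1)).getD ""]
        else new_list ++ [PySem.List.pyGetD l index ""])
      = (fun a x => if decide (PySem.Int.mod x 2 ≠ 0) then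
          a ++ [(PySem.Str.slice? (PySem.List.pyGetD l x "") none none (-1)).getD ""]
        else a ++ [PySem.List.pyGetD l x ""]) from by funext a x; split_ifs <;> simp_all]
  rw [pvFoldl_if_append]
  rw [PySem.List.pyRange_zero_natCast]
  simp only [List.map_map, List.nil_append]
  refine List.map_congr_left (fun k hk => ?_)
  simp only [Function.comp_apply, PySem.List.pyGetD_natCast]
  by_cases h : k % 2 = 1
  · simp [h]
    intro hc; exfalso; omega
  · simp [h]
    intro hc; exfalso; omega

theorem pvMap_eq_go : ∀ (l : List String),
    (List.range l.length).map
        (fun k => if k % 2 = 1 then (PySem.Str.slice? (l.getD k "") none none (-1)).getD "" else l.getD k "")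
      = pvGo l := by
  intro l
  induction l using pvGo.induct with
  | case1 => simp [pvGo]
  | case2 a => simp [pvGo]
  | case3 a b t ih =>
      have h2 : (a :: b :: t).length = t.length + 1 + 1 := by simp
      rw [pvGo, ← ih, h2, List.range_succ_eq_map, List.range_succ_eq_map]
      simp only [List.map_cons, List.map_map]
      refine List.cons_eq_cons.mpr ⟨by simp, List.cons_eq_cons.mpr ⟨by simp, ?_⟩⟩
      refine List.map_congr_left (fun k hk => ?_)
      have hp : (k + 1 + 1) % 2 = k % 2 := by omega
      simp [hp]

-- ===== VERDICT (by name: the statement is the Claim_ definition above) =====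
theorem create_new_list1_spec : Claim_equal_create_new_list1 := by
  intro l _
  unfold Spec_create_new_list1
  rw [pvA_eq_map, pvMap_eq_go, pvAlt_eq_go]
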